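-- pv_equiv track=rewrite | github.com/allending313/Leetcode | mock/longest_valid_string.py | longest_valid_string
-- ===== SOURCE A (Python) =====
-- def longest_valid_string(s: str) -> str:
--     n = len(s)
--     if n < 3:
--         return s
--
--     res = s[:2]
--
--     prev1 = s[1]
--     prev2 = s[0]
--
--     for i in range(2, n):
--         if s[i] == prev1 and s[i] == prev2:
--             continue
--         res += s[i]
--         prev2 = prev1
--         prev1 = s[i]
--
--     return res
-- ===== SOURCE B (Python) =====
-- def longest_valid_string(s: str) -> str:
--     # Group s into maximal runs of identical characters, cap each run at 2.
--     pieces = []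
--     i = 0
--     n = len(s)
--     while i < n:
--         j = i
--         while j < n and s[j] == s[i]:
--             j += 1
--         pieces.append(s[i:j][:2])
--         i = j
--     return ''.join(pieces)
-- ===== Notes on version B (the rewrite author's own statement) =====
-- stated objective: simpler
-- what changed: Replaces the streaming two-previous-character state machine (with an n<3 shortcut) by a run-grouping pass: split s into maximal runs of equal characters and keep at most 2 of each.
import Mathlib
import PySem

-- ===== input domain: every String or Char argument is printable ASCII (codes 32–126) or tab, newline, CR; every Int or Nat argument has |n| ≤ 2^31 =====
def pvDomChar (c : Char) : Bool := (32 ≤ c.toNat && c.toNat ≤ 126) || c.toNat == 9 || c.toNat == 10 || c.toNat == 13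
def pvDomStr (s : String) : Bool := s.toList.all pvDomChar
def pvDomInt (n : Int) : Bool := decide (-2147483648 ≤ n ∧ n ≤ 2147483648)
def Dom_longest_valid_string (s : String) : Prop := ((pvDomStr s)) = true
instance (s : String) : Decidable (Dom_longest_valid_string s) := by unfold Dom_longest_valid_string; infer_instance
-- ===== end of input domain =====

-- B replaces A's streaming two-previous-character state machine by a run-grouping
-- pass (split into maximal equal-character runs, keep at most 2 of each): simpler.


-- ===== PORT A =====
-- the for-loop over s[2:], state = (res, prev2, prev1)
def pvLoopA (res : List Char) (prev2 prev1 : Char) (l : List Char) : List Char :=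
  match l with
  | [] => res
  | c :: cs =>
      if c == prev1 && c == prev2 then pvLoopA res prev2 prev1 cs
      else pvLoopA (res ++ [c]) prev1 c cs

def longest_valid_string (s : String) : String :=
  if s.toList.length < 3 then s
  else
    match s.toList with
    | c0 :: c1 :: rest => String.ofList (pvLoopA [c0, c1] c0 c1 rest)  -- res = s[:2], prev2 = s[0], prev1 = s[1]
    | _ => s  -- unreachable (length ≥ 3)

-- ===== PORT B =====
-- the outer while loop: split s into its maximal runs of equal characters
def pvSplitRuns : List Char → List (List Char)
  | [] => []
  | c :: cs => (c :: cs.takeWhile (· == c)) :: pvSplitRuns (cs.dropWhile (· == c))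
termination_by l => l.length
decreasing_by
  simp only [List.length_cons]
  exact Nat.lt_succ_of_le (List.length_dropWhile_le _ _)

def longest_valid_string_alt (s : String) : String :=
  String.ofList (((pvSplitRuns s.toList).map (fun g => g.take 2)).flatten)

-- ===== PRECONDITION & SPEC =====
def Spec_longest_valid_string (s : String) (out : String) : Prop := out = longest_valid_string_alt s
instance (s : String) (out : String) : Decidable (Spec_longest_valid_string s out) := by unfold Spec_longest_valid_string; infer_instance

-- ===== CLAIM (what is proved, stated in full; the proofs are below) =====
def Claim_equal_longest_valid_string : Prop := ∀ (s : String), Dom_longest_valid_string s → Spec_longest_valid_string s (longest_valid_string s)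

-- ===== LEMMAS AND PROOFS =====

-- tail-style version of A's loop (returns only the part appended to res)
def pvLoopT (prev2 prev1 : Char) (l : List Char) : List Char :=
  match l with
  | [] => []
  | c :: cs =>
      if c == prev1 && c == prev2 then pvLoopT prev2 prev1 cs
      else c :: pvLoopT prev1 c cs

lemma pvLoopA_eq (res : List Char) (a b : Char) (l : List Char) :
    pvLoopA res a b l = res ++ pvLoopT a b l := by
  induction l generalizing res a b with
  | nil => simp [pvLoopA, pvLoopT]
  | cons c cs ih =>
      simp only [pvLoopA, pvLoopT]
      split_ifs with h
      · exact ih res a b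
      · rw [ih (res ++ [c]) b c]; simp

-- B's result as a plain list function
def pvF (l : List Char) : List Char := ((pvSplitRuns l).map (fun g => g.take 2)).flatten

lemma pvF_nil : pvF [] = [] := by simp [pvF, pvSplitRuns]

lemma pvF_cons (c : Char) (cs : List Char) :
    pvF (c :: cs) = c :: (cs.takeWhile (· == c)).take 1 ++ pvF (cs.dropWhile (· == c)) := by
  rw [pvF, pvSplitRuns]
  simp [pvF, List.take_succ_cons]

-- the key correspondence between A's state machine and B's run capping
lemma pv_main : ∀ (n : ℕ) (cs : List Char), cs.length ≤ n → ∀ (a c : Char),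
    (a ≠ c → c :: pvLoopT a c cs = pvF (c :: cs)) ∧
    (pvLoopT c c cs = pvF (cs.dropWhile (· == c))) := by
  intro n
  induction n with
  | zero =>
      intro cs hlen a c
      have : cs = [] := List.eq_nil_of_length_eq_zero (Nat.le_zero.mp hlen)
      subst this
      constructor
      · intro _; simp [pvLoopT, pvF_cons, pvF_nil]
      · simp [pvLoopT, pvF_nil]
  | succ n ih =>
      intro cs hlen a c
      match cs with
      | [] =>
          constructor
          · intro _; simp [pvLoopT, pvF_cons, pvF_nil]
          · simp [pvLoopT, pvF_nil]
      | x :: xs =>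
          have hxs : xs.length ≤ n := by simpa using Nat.succ_le_succ_iff.mp hlen
          constructor
          · intro hac
            rw [pvLoopT]
            by_cases hxc : x = c
            · have hcond : (x == c && x == a) = false := by
                rw [hxc]; simp; exact fun h => hac h.symm
              rw [hcond, if_neg Bool.false_ne_true]
              rw [hxc, (ih xs hxs c c).2]
              rw [pvF_cons]
              simp
            · have hcond : (x == c && x == a) = false := by
                simp; exact fun h => absurd h hxc
              rw [hcond, if_neg Bool.false_ne_true]
              rw [(ih xs hxs c x).1 (fun h => hxc h.symm)]
              rw [pvF_cons c (x :: xs)]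
              simp [hxc]
          · rw [pvLoopT]
            by_cases hxc : x = c
            · rw [hxc]
              simp only [beq_self_eq_true, Bool.and_self, if_true]
              rw [(ih xs hxs c c).2]
              simp
            · have hcond : (x == c && x == c) = false := by
                simp; exact hxc
              rw [hcond, if_neg Bool.false_ne_true]
              rw [(ih xs hxs c x).1 (fun h => hxc h.symm)]
              simp [hxc]

lemma pvF_short (cs : List Char) (h : cs.length ≤ 2) : pvF cs = cs := by
  match cs with
  | [] => exact pvF_nil
  | [x] => rw [pvF_cons]; simp [pvF_nil]
  | [x, y] =>
      rw [pvF_cons]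
      by_cases hyx : y = x
      · subst hyx; simp [pvF_nil]
      · simp [hyx, pvF_cons, pvF_nil]
  | x :: y :: z :: t => simp at h

-- ===== VERDICT (by name: the statement is the Claim_ definition above) =====
theorem longest_valid_string_spec : Claim_equal_longest_valid_string := by
  intro s _
  show longest_valid_string s = longest_valid_string_alt s
  have halt : longest_valid_string_alt s = String.ofList (pvF s.toList) := rfl
  rw [halt]
  unfold longest_valid_string
  by_cases hlen : s.toList.length < 3
  · rw [if_pos hlen, pvF_short _ (by omega), String.ofList_toList]
  · rw [if_neg hlen]
    obtain ⟨c0, c1, rest, h⟩ : ∃ c0 c1 rest, s.toList = c0 :: c1 :: rest := by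
      match hh : s.toList with
      | c0 :: c1 :: rest => exact ⟨_, _, _, rfl⟩
      | [] => rw [hh] at hlen; simp at hlen
      | [x] => rw [hh] at hlen; simp at hlen
    rw [h]
    show String.ofList (pvLoopA [c0, c1] c0 c1 rest) = String.ofList (pvF (c0 :: c1 :: rest))
    rw [pvLoopA_eq]
    by_cases hcc : c0 = c1
    · rw [← hcc, (pv_main rest.length rest le_rfl c0 c0).2]
      rw [pvF_cons]
      simp
    · have h1 := (pv_main rest.length rest le_rfl c0 c1).1 hcc
      have : ([c0, c1] : List Char) ++ pvLoopT c0 c1 rest = c0 :: (c1 :: pvLoopT c0 c1 rest) := rfl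
      rw [this, h1, pvF_cons c0 (c1 :: rest)]
      simp [Ne.symm hcc]
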